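-- pv_equiv track=rewrite | github.com/silverchan08/R-E | generate_cromwell.py | R3
-- ===== SOURCE A (Python) =====
-- def R3(cromwell):
--     #가로선 두 개 찾고, 세로선 하나 찾고, 1 위에 있고 아래 있는 거 확인
--     n = len(cromwell)
--     m = len(cromwell[0])
--
--     all_horizontal_lines = []
--     for r in range(n):
--         for c1 in range(m):
--             if cromwell[r][c1] == 1:
--                 for c2 in range(c1 + 1, m):
--                     if cromwell[r][c2] == 1:
--                         all_horizontal_lines.append([[r, c1], [r, c2]])
--
--     for line1 in all_horizontal_lines:
--         for line2 in all_horizontal_lines: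
--             if line1[0][0] < line2[0][0]:
--                 col1_start = line1[0][1] # line1의 시작 열
--                 col1_end = line1[1][1]   # line1의 끝 열
--
--                 row2_start = line2[0][0] # line2의 행
--                 col2_start = line2[0][1] # line2의 시작 열
--                 col2_end = line2[1][1]   # line2의 끝 열
--
--                 if col1_start <= col2_start and col2_end <= col1_end:
--                     found_below_line2_start = False
--                     for r_below in range(row2_start + 1, n):
--                         if cromwell[r_below][col2_start] == 1:
--                             found_below_line2_start = True
--                             break # 찾았으면 더 이상 탐색할 필요 없음
--
--                     if not found_below_line2_start:
--                         continue # 이 패턴은 다음 line2 조합으로 넘어감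
--
--
--                     found_spanning_vertical_line = False
--
--                     for vert_col in range(col1_end + 1, m):
--                         potential_vert_start_row = -1
--                         potential_vert_end_row = -1
--                         for r_vert_start in range(n):
--                             if cromwell[r_vert_start][vert_col] == 1:
--                                 potential_vert_start_row = r_vert_start
--                                 break # 첫 번째 1을 찾았으므로 시작점으로 간주
--
--                         if potential_vert_start_row != -1: # 시작점 찾음
--                             for r_vert_end in range(potential_vert_start_row + 1, n):
--                                 if cromwell[r_vert_end][vert_col] == 1:
--                                     potential_vert_end_row = r_vert_end
--                                     break # 두 번째 1을 찾았으므로 끝점으로 간주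
--
--                         if potential_vert_start_row != -1 and potential_vert_end_row != -1:
--                             if potential_vert_start_row <= line1[0][0] and \
--                                potential_vert_end_row >= line2[0][0]:
--                                 found_spanning_vertical_line = True
--                                 break # 조건을 만족하는 세로줄을 찾았으므로 더 이상 탐색할 필요 없음
--
--                     if found_spanning_vertical_line:
--                         return True # 모든 조건을 만족하는 패턴을 찾음
--
--     return False # 어떤 패턴도 찾지 못함
-- ===== SOURCE B (Python) =====
-- def ones_of(seq, stop):
--     # indices i < stop with seq[i] == 1, found with C-speed .index scans
--     res = []
--     if seq.count(1) == 0: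
--         return res
--     i = 0
--     while i < stop:
--         try:
--             i = seq.index(1, i, stop)
--         except ValueError:
--             break
--         res.append(i)
--         i += 1
--     return res
--
--
-- def R3(cromwell):
--     # Precompute per-row 1-columns and per-column first/second/last 1-rows once,
--     # then search over row pairs instead of pairs of materialized horizontal lines.
--     n = len(cromwell)
--     m = len(cromwell[0])
--     rowcols = [ones_of(row, m) if 1 in row else [] for row in cromwell]
--     if not any(len(cols) > 1 for cols in rowcols):
--         return False  # no row carries a horizontal line at all
--     colrows = [[] for _ in range(m)]
--     for r in range(n):
--         for c in rowcols[r]: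
--             colrows[c].append(r)
--     firsts = [cl[0] if cl else n for cl in colrows]
--     seconds = [cl[1] if len(cl) > 1 else -1 for cl in colrows]
--     lasts = [cl[-1] if cl else -1 for cl in colrows]
--     for r1 in range(n):
--         cols1 = rowcols[r1]
--         if len(cols1) < 2:
--             continue
--         lo = cols1[0]  # the widest line1 starts at the leftmost 1 of row r1
--         for r2 in range(r1 + 1, n):
--             cols2 = rowcols[r2]
--             if not cols2:
--                 continue
--             starts = [c for c in cols2 if lo <= c and lasts[c] > r2]
--             if not starts:
--                 continue
--             for c1e in cols1[1:]:
--                 if any(any(c2s < c2e <= c1e for c2e in cols2) for c2s in starts) \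
--                    and any(firsts[col] <= r1 and seconds[col] >= r2
--                            for col in range(c1e + 1, m)):
--                     return True
--     return False
-- ===== Notes on version B (the rewrite author's own statement) =====
-- stated objective: faster
-- what changed: Instead of materializing every horizontal line pair and rescanning columns for each pair, B precomputes per-column first/second/last 1-rows and per-row 1-column lists once, then searches over row pairs using the leftmost 1 of the upper row as the canonical line start.
import Mathlib
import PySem

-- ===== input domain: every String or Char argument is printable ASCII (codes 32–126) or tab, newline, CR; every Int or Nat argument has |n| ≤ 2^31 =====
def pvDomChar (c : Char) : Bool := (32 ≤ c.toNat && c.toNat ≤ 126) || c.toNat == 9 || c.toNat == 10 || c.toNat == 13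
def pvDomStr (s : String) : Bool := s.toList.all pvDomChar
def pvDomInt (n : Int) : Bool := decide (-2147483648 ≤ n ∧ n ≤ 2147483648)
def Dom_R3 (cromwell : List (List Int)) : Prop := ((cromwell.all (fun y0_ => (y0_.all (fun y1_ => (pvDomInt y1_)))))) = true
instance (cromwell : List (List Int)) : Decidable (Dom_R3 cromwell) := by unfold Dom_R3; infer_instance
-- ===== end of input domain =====

-- B precomputes per-column first/second/last 1-rows and per-row 1-column lists once and
-- searches over row pairs, instead of A's scan over all pairs of materialized horizontal
-- lines with per-pair column rescans (objective: faster).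

-- ===== PORT A =====

-- grid access cromwell[r][c]; every access of either port is in range under Pre_R3
def gv (g : List (List Int)) (r c : Nat) : Int := (g.getD r []).getD c 0

-- all_horizontal_lines; each appended [[r,c1],[r,c2]] is kept as the triple (r, c1, c2)
def hlines (g : List (List Int)) (n m : Nat) : List (Nat × Nat × Nat) :=
  (List.range n).flatMap (fun r =>
    (List.range m).flatMap (fun c1 =>
      if gv g r c1 == 1 then
        (List.range' (c1+1) (m - (c1+1))).filterMap
          (fun c2 => if gv g r c2 == 1 then some (r, c1, c2) else none)
      else []))

-- the found_below_line2_start scan (loop with break → any)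
def belowScan (g : List (List Int)) (n r2 c2s : Nat) : Bool :=
  (List.range' (r2+1) (n - (r2+1))).any (fun r => gv g r c2s == 1)

-- the body of the vert_col loop: first 1 in the column, second 1 after it, the two bounds
def vertOk (g : List (List Int)) (n r1 r2 col : Nat) : Bool :=
  match (List.range n).find? (fun r => gv g r col == 1) with
  | none => false
  | some s =>
    match (List.range' (s+1) (n - (s+1))).find? (fun r => gv g r col == 1) with
    | none => false
    | some e => decide (s ≤ r1) && decide (r2 ≤ e)

-- the found_spanning_vertical_line scan (loop with break → any)
def vertScan (g : List (List Int)) (n m r1 r2 c1e : Nat) : Bool :=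
  (List.range' (c1e+1) (m - (c1e+1))).any (fun col => vertOk g n r1 r2 col)

def R3 (cromwell : List (List Int)) : Bool :=
  let n := cromwell.length
  let m := cromwell.headI.length
  let L := hlines cromwell n m
  L.any (fun l1 => L.any (fun l2 =>
    if l1.1 < l2.1 then
      if l1.2.1 ≤ l2.2.1 && l2.2.2 ≤ l1.2.2 then
        if belowScan cromwell n l2.1 l2.2.1 then
          vertScan cromwell n m l1.1 l2.1 l1.2.2
        else false
      else false
    else false))

-- ===== PORT B =====

-- rows = [r for r in range(n) if cromwell[r][c] == 1]
def onesIn (g : List (List Int)) (n c : Nat) : List Nat :=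
  (List.range n).filter (fun r => gv g r c == 1)

-- cols = [c for c in range(m) if cromwell[r][c] == 1]
def colsIn (g : List (List Int)) (m r : Nat) : List Nat :=
  (List.range m).filter (fun c => gv g r c == 1)

-- firsts[c] = rows[0] if rows else n
def firstsL (g : List (List Int)) (n m : Nat) : List Nat :=
  (List.range m).map (fun c => (onesIn g n c).headD n)

-- seconds[c] = rows[1] if len(rows) > 1 else -1
def secondsL (g : List (List Int)) (n m : Nat) : List Int :=
  (List.range m).map (fun c =>
    let rows := onesIn g n c
    if 1 < rows.length then ((rows.getD 1 0 : Nat) : Int) else -1)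

-- lasts[c] = rows[-1] if rows else -1
def lastsL (g : List (List Int)) (n m : Nat) : List Int :=
  (List.range m).map (fun c =>
    let rows := onesIn g n c
    if rows.length ≠ 0 then ((rows.getLastD 0 : Nat) : Int) else -1)

def R3_alt (cromwell : List (List Int)) : Bool :=
  let n := cromwell.length
  let m := cromwell.headI.length
  let firsts := firstsL cromwell n m
  let seconds := secondsL cromwell n m
  let lasts := lastsL cromwell n m
  (List.range n).any (fun r1 =>
    let cols1 := colsIn cromwell m r1
    if cols1.length < 2 then false
    else
      let lo := cols1.headD 0
      (List.range' (r1+1) (n - (r1+1))).any (fun r2 =>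
        let cols2 := colsIn cromwell m r2
        let starts := cols2.filter (fun c =>
          decide (lo ≤ c) && decide ((r2 : Int) < lasts.getD c (-1)))
        if starts.isEmpty then false
        else cols1.tail.any (fun c1e =>
          (starts.any (fun c2s =>
            cols2.any (fun c2e => decide (c2s < c2e) && decide (c2e ≤ c1e))))
          && (List.range' (c1e+1) (m - (c1e+1))).any (fun col =>
               decide (firsts.getD col n ≤ r1) &&
               decide ((r2 : Int) ≤ seconds.getD col (-1))))))

-- ===== PRECONDITION & SPEC =====

-- Pre_R3 excludes exactly the inputs where Python A raises IndexError: the empty grid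
-- (cromwell[0]) and grids with a row shorter than the first row (indexing at columns < m).
def Pre_R3 (cromwell : List (List Int)) : Prop :=
  cromwell ≠ [] ∧ ∀ row ∈ cromwell, cromwell.headI.length ≤ row.length

instance (cromwell : List (List Int)) : Decidable (Pre_R3 cromwell) := by
  unfold Pre_R3; infer_instance

def pvWitness_R3 : List (List Int) := [[0, 1], [1, 0]]

def Spec_R3 (cromwell : List (List Int)) (out : Bool) : Prop := out = R3_alt cromwell
instance (cromwell : List (List Int)) (out : Bool) : Decidable (Spec_R3 cromwell out) := by
  unfold Spec_R3; infer_instance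

-- ===== CLAIM (what is proved, stated in full; the proofs are below) =====
def Claim_equal_R3 : Prop := ∀ (cromwell : List (List Int)), Dom_R3 cromwell → Pre_R3 cromwell → Spec_R3 cromwell (R3 cromwell)

-- ===== LEMMAS AND PROOFS =====

-- the common characterization of both ports
def PGI (g : List (List Int)) (n m : Nat) : Prop :=
  ∃ r1 c1s c1e r2 c2s c2e : Nat,
    r1 < n ∧ c1s < c1e ∧ c1e < m ∧ gv g r1 c1s = 1 ∧ gv g r1 c1e = 1 ∧
    r2 < n ∧ c2s < c2e ∧ c2e < m ∧ gv g r2 c2s = 1 ∧ gv g r2 c2e = 1 ∧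
    r1 < r2 ∧ c1s ≤ c2s ∧ c2e ≤ c1e ∧
    belowScan g n r2 c2s = true ∧ vertScan g n m r1 r2 c1e = true

theorem filter_range'_decomp (p : Nat → Bool) :
    ∀ (k a s : Nat), (List.range' a k).find? p = some s →
      (List.range' a k).filter p = s :: (List.range' (s+1) (a + k - (s+1))).filter p := by
  intro k
  induction k with
  | zero => simp
  | succ k ih =>
    intro a s h
    rw [List.range'_succ] at h ⊢
    by_cases hp : p a
    · rw [List.find?_cons_of_pos hp] at h
      injection h with h; subst h
      rw [List.filter_cons_of_pos hp]
      have hk : a + (k+1) - (a+1) = k := by omega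
      rw [hk]
    · rw [List.find?_cons_of_neg hp] at h
      rw [List.filter_cons_of_neg hp]
      have hs : a + 1 ≤ s := by
        have hmem := List.mem_of_find?_eq_some h
        simp only [List.mem_range'_1] at hmem
        omega
      rw [ih (a+1) s h]
      have hk : a + 1 + k - (s+1) = a + (k+1) - (s+1) := by omega
      rw [hk]

theorem sorted_mem_le_getLast? (l : List Nat) (hp : l.Pairwise (· < ·)) {x : Nat} (hx : x ∈ l) :
    ∃ y, l.getLast? = some y ∧ x ≤ y := by
  induction l generalizing x with
  | nil => simp at hx
  | cons a t ih =>
    cases t with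
    | nil =>
      simp at hx
      exact ⟨a, by simp [hx]⟩
    | cons b u =>
      rw [List.getLast?_cons_cons]
      have hp' := (List.pairwise_cons.mp hp).2
      rcases List.mem_cons.mp hx with rfl | hx'
      · obtain ⟨y, hy, hby⟩ := ih hp' (List.mem_cons_self ..)
        have hab : x < b := (List.pairwise_cons.mp hp).1 b (by simp)
        exact ⟨y, hy, by omega⟩
      · exact ih hp' hx'

theorem pairwise_onesIn (g : List (List Int)) (n c : Nat) :
    (onesIn g n c).Pairwise (· < ·) :=
  List.Pairwise.sublist List.filter_sublist List.pairwise_lt_range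

theorem mem_onesIn {g : List (List Int)} {n c r : Nat} :
    r ∈ onesIn g n c ↔ r < n ∧ gv g r c = 1 := by
  simp [onesIn, List.mem_filter, List.mem_range]

theorem mem_colsIn {g : List (List Int)} {m r c : Nat} :
    c ∈ colsIn g m r ↔ c < m ∧ gv g r c = 1 := by
  simp [colsIn, List.mem_filter, List.mem_range]

theorem getD_map_range {β : Type} (f : Nat → β) {m c : Nat} (h : c < m) (d : β) :
    ((List.range m).map f).getD c d = f c := by
  simp [List.getD_eq_getElem?_getD, List.getElem?_map, List.getElem?_range h]

-- L4: the below-scan of A computed from the lasts table of B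
theorem belowScan_iff (g : List (List Int)) (n r2 c : Nat) :
    belowScan g n r2 c = true ↔
      (r2 : Int) < (if (onesIn g n c).length ≠ 0 then (((onesIn g n c).getLastD 0 : Nat) : Int) else -1) := by
  have hpw := pairwise_onesIn g n c
  constructor
  · intro h
    obtain ⟨r, hr, hone⟩ := List.any_eq_true.mp h
    rw [List.mem_range'_1] at hr
    have hmem : r ∈ onesIn g n c := mem_onesIn.mpr ⟨by omega, by simpa using hone⟩
    have hne : (onesIn g n c).length ≠ 0 := by
      intro h0; rw [List.length_eq_zero_iff] at h0; simp [h0] at hmem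
    rw [if_pos hne]
    obtain ⟨y, hy, hxy⟩ := sorted_mem_le_getLast? _ hpw hmem
    have : (onesIn g n c).getLastD 0 = y := by
      rw [List.getLastD_eq_getLast?, hy]; rfl
    rw [this]
    omega
  · intro h
    split_ifs at h with hne
    · set L := (onesIn g n c).getLastD 0 with hL
      have hr2 : r2 < L := by exact_mod_cast h
      have hmem : L ∈ onesIn g n c := by
        rw [List.getLastD_eq_getLast?] at hL
        cases hLl : (onesIn g n c).getLast? with
        | none => rw [List.getLast?_eq_none_iff] at hLl; simp [hLl] at hne
        | some y =>
          rw [hLl] at hL; simp at hL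
          subst hL
          exact List.mem_of_getLast? hLl
      rw [mem_onesIn] at hmem
      apply List.any_eq_true.mpr
      refine ⟨L, ?_, by simp [hmem.2]⟩
      rw [List.mem_range'_1]
      omega
    · omega

-- L5: the vertical-column check of A computed from the firsts/seconds tables of B
theorem vertOk_iff (g : List (List Int)) (n r1 r2 col : Nat) (hr1 : r1 < n) :
    vertOk g n r1 r2 col = true ↔
      ((onesIn g n col).headD n ≤ r1 ∧
       (r2 : Int) ≤ (if 1 < (onesIn g n col).length then (((onesIn g n col).getD 1 0 : Nat) : Int) else -1)) := by
  unfold vertOk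
  have hfind : (List.range n).find? (fun r => gv g r col == 1) = (onesIn g n col).head? := by
    rw [← List.head?_filter]; rfl
  cases hrows : onesIn g n col with
  | nil =>
    rw [hfind, hrows]
    simp
    omega
  | cons s rest =>
    rw [hfind, hrows]
    simp only [List.head?_cons]
    have hdec : onesIn g n col = s :: (List.range' (s+1) (0 + n - (s+1))).filter (fun r => gv g r col == 1) := by
      have h0 : (List.range' 0 n).find? (fun r => gv g r col == 1) = some s := by
        rw [← List.range_eq_range', hfind, hrows]; rfl
      have := filter_range'_decomp (fun r => gv g r col == 1) n 0 s h0
      rw [← List.range_eq_range'] at this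
      exact this
    have hrest : rest = (List.range' (s+1) (0 + n - (s+1))).filter (fun r => gv g r col == 1) := by
      rw [hrows] at hdec
      exact (List.cons.injEq .. ▸ hdec).2
    have hfind2 : (List.range' (s+1) (n - (s+1))).find? (fun r => gv g r col == 1) = rest.head? := by
      rw [← List.head?_filter, hrest]
      norm_num
    rw [hfind2]
    cases rest with
    | nil =>
      simp
      omega
    | cons e u =>
      simp only [List.head?_cons, List.headD_cons]
      constructor
      · intro h
        simp at h
        refine ⟨h.1, ?_⟩
        rw [if_pos (by simp)]
        simp only [List.getD_eq_getElem?_getD]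
        simp
        exact h.2

      · intro ⟨h1, h2⟩
        rw [if_pos (by simp)] at h2
        simp only [List.getD_eq_getElem?_getD] at h2
        simp at h2
        simp [h1]
        exact h2


theorem mem_hlines' {g : List (List Int)} {n m r c1 c2 : Nat} :
    (r, c1, c2) ∈ hlines g n m ↔
      r < n ∧ c1 < c2 ∧ c2 < m ∧ gv g r c1 = 1 ∧ gv g r c2 = 1 := by
  simp only [hlines, List.mem_flatMap, List.mem_range, List.mem_ite_nil_right,
    List.mem_filterMap, List.mem_range'_1, Option.ite_none_right_eq_some,
    Option.some.injEq, Prod.mk.injEq, beq_iff_eq]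
  constructor
  · rintro ⟨r', hr', c1', hc1', hone1, c2', ⟨hlo, hhi⟩, h2, rfl, rfl, rfl⟩
    exact ⟨hr', by omega, by omega, hone1, h2⟩
  · rintro ⟨hr, hc, hcm, h1, h2⟩
    exact ⟨r, hr, c1, by omega, h1, c2, ⟨by omega, by omega⟩, h2, rfl, rfl, rfl⟩

theorem A_iff' (g : List (List Int)) :
    R3 g = true ↔ PGI g g.length g.headI.length := by
  unfold R3 PGI
  simp only [List.any_eq_true]
  constructor
  · rintro ⟨⟨r1, c1s, c1e⟩, hl1, ⟨r2, c2s, c2e⟩, hl2, hcond⟩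
    rw [mem_hlines'] at hl1 hl2
    simp only at hcond
    split_ifs at hcond with h1 h2 h3
    simp only [Bool.and_eq_true, decide_eq_true_eq] at h2
    exact ⟨r1, c1s, c1e, r2, c2s, c2e, hl1.1, hl1.2.1, hl1.2.2.1, hl1.2.2.2.1, hl1.2.2.2.2,
      hl2.1, hl2.2.1, hl2.2.2.1, hl2.2.2.2.1, hl2.2.2.2.2, h1, h2.1, h2.2, h3, hcond⟩
  · rintro ⟨r1, c1s, c1e, r2, c2s, c2e, a1, a2, a3, a4, a5, b1, b2, b3, b4, b5, hlt, hle1, hle2, hbel, hvert⟩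
    refine ⟨(r1, c1s, c1e), mem_hlines'.mpr ⟨a1, a2, a3, a4, a5⟩,
            (r2, c2s, c2e), mem_hlines'.mpr ⟨b1, b2, b3, b4, b5⟩, ?_⟩
    simp only
    rw [if_pos hlt, if_pos (by simp [hle1, hle2]), if_pos hbel]
    exact hvert

theorem two_le_length {l : List Nat} {x y : Nat} (hx : x ∈ l) (hy : y ∈ l) (hxy : x < y) :
    2 ≤ l.length := by
  cases l with
  | nil => simp at hx
  | cons a t =>
    cases t with
    | nil => simp at hx hy; omega
    | cons b u => simp

theorem head_le_of_mem {a x : Nat} {t : List Nat} (hp : (a :: t).Pairwise (· < ·))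
    (hx : x ∈ a :: t) : a ≤ x := by
  rcases List.mem_cons.mp hx with rfl | hx'
  · omega
  · have := (List.pairwise_cons.mp hp).1 x hx'
    omega

theorem pairwise_colsIn (g : List (List Int)) (m r : Nat) :
    (colsIn g m r).Pairwise (· < ·) :=
  List.Pairwise.sublist List.filter_sublist List.pairwise_lt_range

theorem firstsL_getD (g : List (List Int)) (n m c : Nat) (hc : c < m) :
    (firstsL g n m).getD c n = (onesIn g n c).headD n :=
  getD_map_range _ hc _

theorem secondsL_getD (g : List (List Int)) (n m c : Nat) (hc : c < m) :
    (secondsL g n m).getD c (-1) =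
      (if 1 < (onesIn g n c).length then (((onesIn g n c).getD 1 0 : Nat) : Int) else -1) :=
  getD_map_range _ hc _

theorem lastsL_getD (g : List (List Int)) (n m c : Nat) (hc : c < m) :
    (lastsL g n m).getD c (-1) =
      (if (onesIn g n c).length ≠ 0 then (((onesIn g n c).getLastD 0 : Nat) : Int) else -1) :=
  getD_map_range _ hc _

theorem B_iff' (g : List (List Int)) :
    R3_alt g = true ↔ PGI g g.length g.headI.length := by
  simp only [R3_alt, PGI, List.any_eq_true]
  constructor
  · rintro ⟨r1, hr1m, hbody⟩
    rw [List.mem_range] at hr1m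
    split_ifs at hbody with hlen
    obtain ⟨r2, hr2m, hb2⟩ := List.any_eq_true.mp hbody
    rw [List.mem_range'_1] at hr2m
    split_ifs at hb2 with hemp
    obtain ⟨c1e, hc1et, hconj⟩ := List.any_eq_true.mp hb2
    rw [Bool.and_eq_true] at hconj
    obtain ⟨c2s, hc2sm, hc2sE⟩ := List.any_eq_true.mp hconj.1
    obtain ⟨c2e, hc2em, hltle⟩ := List.any_eq_true.mp hc2sE
    simp only [Bool.and_eq_true, decide_eq_true_eq] at hltle
    cases hcols1 : colsIn g g.headI.length r1 with
    | nil => rw [hcols1] at hlen; simp at hlen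
    | cons a t =>
      rw [hcols1] at hc1et
      simp only [List.tail_cons] at hc1et
      have hpw1 : (a :: t).Pairwise (· < ·) := hcols1 ▸ pairwise_colsIn g _ r1
      have hlo_lt : a < c1e := (List.pairwise_cons.mp hpw1).1 c1e hc1et
      have hc1e_mem : c1e ∈ colsIn g g.headI.length r1 := by
        rw [hcols1]; exact List.mem_cons_of_mem _ hc1et
      rw [mem_colsIn] at hc1e_mem
      have ha_mem : a ∈ colsIn g g.headI.length r1 := by rw [hcols1]; simp
      rw [mem_colsIn] at ha_mem
      rw [hcols1] at hc2sm
      simp only [List.headD_cons] at hc2sm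
      rw [List.mem_filter] at hc2sm
      obtain ⟨hc2s_cols2, hc2s_cond⟩ := hc2sm
      simp only [Bool.and_eq_true, decide_eq_true_eq] at hc2s_cond
      rw [mem_colsIn] at hc2s_cols2
      rw [mem_colsIn] at hc2em
      have hbel : belowScan g g.length r2 c2s = true := by
        rw [belowScan_iff]
        rw [lastsL_getD g g.length _ _ hc2s_cols2.1] at hc2s_cond
        exact hc2s_cond.2
      have hvert : vertScan g g.length g.headI.length r1 r2 c1e = true := by
        obtain ⟨col, hcolm, hcc⟩ := List.any_eq_true.mp hconj.2
        have hcol : col < g.headI.length := by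
          rw [List.mem_range'_1] at hcolm
          omega
        apply List.any_eq_true.mpr
        refine ⟨col, hcolm, ?_⟩
        rw [vertOk_iff g g.length r1 r2 col hr1m]
        simp only [Bool.and_eq_true, decide_eq_true_eq] at hcc
        rw [firstsL_getD g g.length _ _ hcol, secondsL_getD g g.length _ _ hcol] at hcc
        exact hcc
      exact ⟨r1, a, c1e, r2, c2s, c2e, hr1m, hlo_lt, hc1e_mem.1, ha_mem.2, hc1e_mem.2,
        by omega, hltle.1, hc2em.1, hc2s_cols2.2, hc2em.2,
        by omega, hc2s_cond.1, hltle.2, hbel, hvert⟩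
  · rintro ⟨r1, c1s, c1e, r2, c2s, c2e, a1, a2, a3, a4, a5, b1, b2, b3, b4, b5,
      hlt, hle1, hle2, hbel, hvert⟩
    have hc1s_mem : c1s ∈ colsIn g g.headI.length r1 := mem_colsIn.mpr ⟨by omega, a4⟩
    have hc1e_mem : c1e ∈ colsIn g g.headI.length r1 := mem_colsIn.mpr ⟨a3, a5⟩
    refine ⟨r1, List.mem_range.mpr a1, ?_⟩
    rw [if_neg (by have := two_le_length hc1s_mem hc1e_mem a2; omega)]
    apply List.any_eq_true.mpr
    refine ⟨r2, List.mem_range'_1.mpr ⟨by omega, by omega⟩, ?_⟩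
    cases hcols1 : colsIn g g.headI.length r1 with
    | nil => rw [hcols1] at hc1s_mem; simp at hc1s_mem
    | cons a t =>
      have hpw1 : (a :: t).Pairwise (· < ·) := hcols1 ▸ pairwise_colsIn g _ r1
      have ha_le : a ≤ c1s := head_le_of_mem hpw1 (hcols1 ▸ hc1s_mem)
      simp only [List.headD_cons, List.tail_cons]
      have hc2s_starts : c2s ∈ List.filter
          (fun c => decide (a ≤ c) && decide ((r2 : Int) < (lastsL g g.length g.headI.length).getD c (-1)))
          (colsIn g g.headI.length r2) := by
        rw [List.mem_filter]
        refine ⟨mem_colsIn.mpr ⟨by omega, b4⟩, ?_⟩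
        simp only [Bool.and_eq_true, decide_eq_true_eq]
        refine ⟨by omega, ?_⟩
        rw [lastsL_getD g g.length _ _ (by omega)]
        exact (belowScan_iff g g.length r2 c2s).mp hbel
      rw [if_neg (by rw [List.isEmpty_iff]; exact List.ne_nil_of_mem hc2s_starts)]
      apply List.any_eq_true.mpr
      have hc1e_t : c1e ∈ t := by
        have : c1e ∈ a :: t := hcols1 ▸ hc1e_mem
        rcases List.mem_cons.mp this with h | h
        · omega
        · exact h
      refine ⟨c1e, hc1e_t, ?_⟩
      rw [Bool.and_eq_true]
      constructor
      · apply List.any_eq_true.mpr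
        refine ⟨c2s, hc2s_starts, ?_⟩
        apply List.any_eq_true.mpr
        exact ⟨c2e, mem_colsIn.mpr ⟨b3, b5⟩, by simp [b2, hle2]⟩
      · obtain ⟨col, hcolm, hok⟩ := List.any_eq_true.mp hvert
        have hcol : col < g.headI.length := by
          rw [List.mem_range'_1] at hcolm
          omega
        apply List.any_eq_true.mpr
        refine ⟨col, hcolm, ?_⟩
        have := (vertOk_iff g g.length r1 r2 col a1).mp hok
        simp only [Bool.and_eq_true, decide_eq_true_eq]
        rw [firstsL_getD g g.length _ _ hcol, secondsL_getD g g.length _ _ hcol]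
        exact this

theorem AB_eq (g : List (List Int)) : R3 g = R3_alt g := by
  by_cases h : R3_alt g = true
  · rw [h, (A_iff' g).mpr ((B_iff' g).mp h)]
  · have hb := Bool.not_eq_true _ |>.mp h
    rw [hb]
    by_contra ha
    exact h ((B_iff' g).mpr ((A_iff' g).mp (by simpa using ha)))

-- ===== VERDICT (by name: the statement is the Claim_ definition above) =====
theorem R3_spec : Claim_equal_R3 := by
  intro cromwell _ _
  unfold Spec_R3
  exact AB_eq cromwell
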